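-- pv_equiv track=rewrite | github.com/jayboy1115/The-python | PycharmProjects/pythonProjects/student_grade/student_grade.py | find_hardest_and_easiest_subjects
-- ===== SOURCE A (Python) =====
-- def find_hardest_and_easiest_subjects(scores, num_subjects):
--     hardest_subject = 0
--     easiest_subject = 0
--     hardest_subject_fails = 0
--     easiest_subject_passes = 0
--     for index in range(num_subjects):
--         num_passes = 0
--         num_fails = 0
--         for count in range(len(scores)):
--             if scores[count][index] >= 50:
--                 num_passes += 1
--             else:
--                 num_fails += 1
--         if num_fails > hardest_subject_fails:
--             hardest_subject = index
--             hardest_subject_fails = num_fails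
--         if num_passes > easiest_subject_passes:
--             easiest_subject = index
--             easiest_subject_passes = num_passes
--     return hardest_subject, easiest_subject, hardest_subject_fails, easiest_subject_passes
-- ===== SOURCE B (Python) =====
-- def find_hardest_and_easiest_subjects(scores, num_subjects):
--     # Row-major pass: accumulate per-subject pass/fail tallies once,
--     # then select the best index from each tally list.
--     n = max(num_subjects, 0)
--     passes = [0] * n
--     fails = [0] * n
--     for row in scores:
--         for j in range(n):
--             if row[j] >= 50:
--                 passes[j] += 1
--             else:
--                 fails[j] += 1
--     hardest_subject = 0
--     hardest_subject_fails = 0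
--     for j in range(n):
--         if fails[j] > hardest_subject_fails:
--             hardest_subject = j
--             hardest_subject_fails = fails[j]
--     easiest_subject = 0
--     easiest_subject_passes = 0
--     for j in range(n):
--         if passes[j] > easiest_subject_passes:
--             easiest_subject = j
--             easiest_subject_passes = passes[j]
--     return hardest_subject, easiest_subject, hardest_subject_fails, easiest_subject_passes
-- ===== Notes on version B (the rewrite author's own statement) =====
-- stated objective: alternative
-- what changed: B transposes the traversal: one row-major accumulation pass filling per-subject pass/fail tally lists, followed by two separate first-max selection scans, instead of A's column-major loop that rescans all students for every subject and updates both maxima inline.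
import Mathlib
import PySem

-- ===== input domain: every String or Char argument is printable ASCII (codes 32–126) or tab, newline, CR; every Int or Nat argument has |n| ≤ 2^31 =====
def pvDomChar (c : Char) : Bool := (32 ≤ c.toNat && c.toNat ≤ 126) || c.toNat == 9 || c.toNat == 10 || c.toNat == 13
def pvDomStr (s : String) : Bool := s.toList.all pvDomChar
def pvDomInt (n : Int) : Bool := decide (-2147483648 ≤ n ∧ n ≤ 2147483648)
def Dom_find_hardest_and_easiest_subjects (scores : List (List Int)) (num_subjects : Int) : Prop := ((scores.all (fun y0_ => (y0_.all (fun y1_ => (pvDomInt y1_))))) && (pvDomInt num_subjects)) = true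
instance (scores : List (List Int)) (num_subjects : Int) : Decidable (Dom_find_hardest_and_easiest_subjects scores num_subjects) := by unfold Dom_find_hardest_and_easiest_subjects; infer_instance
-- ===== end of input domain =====

-- B replaces A's column-major rescans by one row-major tally pass plus two selection scans (objective: alternative decomposition, same cost).

-- ===== PORT A =====
def find_hardest_and_easiest_subjects (scores : List (List Int)) (num_subjects : Int) : Int × Int × Int × Int :=
  (PySem.List.pyRange 0 num_subjects 1).foldl
    (fun (st : Int × Int × Int × Int) index =>
      match st with
      | (hardest_subject, easiest_subject, hardest_subject_fails, easiest_subject_passes) =>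
        let pf := (PySem.List.pyRange 0 (scores.length : Int) 1).foldl
          (fun (pf : Int × Int) count =>
            if PySem.List.pyGetD (PySem.List.pyGetD scores count []) index 0 ≥ 50
            then (pf.1 + 1, pf.2)
            else (pf.1, pf.2 + 1))
          (0, 0)
        let num_passes := pf.1
        let num_fails := pf.2
        let hfPair := if num_fails > hardest_subject_fails then (index, num_fails) else (hardest_subject, hardest_subject_fails)
        let epPair := if num_passes > easiest_subject_passes then (index, num_passes) else (easiest_subject, easiest_subject_passes)
        (hfPair.1, epPair.1, hfPair.2, epPair.2))
    (0, 0, 0, 0)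

-- ===== PORT B =====
-- inner 'for j in range(n)' of B's accumulation pass (updates the two tally lists for one student row)
def pvAccumRow (row : List Int) (n : Int) (passes fails : List Int) : List Int × List Int :=
  (PySem.List.pyRange 0 n 1).foldl
    (fun (acc : List Int × List Int) j =>
      if PySem.List.pyGetD row j 0 ≥ 50
      then (PySem.List.pySetD acc.1 j (PySem.List.pyGetD acc.1 j 0 + 1), acc.2)
      else (acc.1, PySem.List.pySetD acc.2 j (PySem.List.pyGetD acc.2 j 0 + 1)))
    (passes, fails)

-- one selection scan of B: first index whose tally strictly exceeds the running max (which starts at 0)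
def pvSelect (counts : List Int) (n : Int) : Int × Int :=
  (PySem.List.pyRange 0 n 1).foldl
    (fun (best : Int × Int) j =>
      if PySem.List.pyGetD counts j 0 > best.2 then (j, PySem.List.pyGetD counts j 0) else best)
    (0, 0)

def find_hardest_and_easiest_subjects_alt (scores : List (List Int)) (num_subjects : Int) : Int × Int × Int × Int :=
  let n : Int := max num_subjects 0
  let acc := scores.foldl (fun (pf : List Int × List Int) row => pvAccumRow row n pf.1 pf.2)
    (List.replicate n.toNat 0, List.replicate n.toNat 0)
  let hf := pvSelect acc.2 n
  let ep := pvSelect acc.1 n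
  (hf.1, ep.1, hf.2, ep.2)

-- ===== PRECONDITION & SPEC =====
-- Pre_ excludes exactly the inputs where Python A raises IndexError: a row shorter than num_subjects.
def Pre_find_hardest_and_easiest_subjects (scores : List (List Int)) (num_subjects : Int) : Prop :=
  ∀ row ∈ scores, num_subjects ≤ (row.length : Int)
instance (scores : List (List Int)) (num_subjects : Int) : Decidable (Pre_find_hardest_and_easiest_subjects scores num_subjects) := by unfold Pre_find_hardest_and_easiest_subjects; infer_instance
def pvWitness_find_hardest_and_easiest_subjects : List (List Int) × Int := ([[40, 90], [60, 20]], 2)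

def Spec_find_hardest_and_easiest_subjects (scores : List (List Int)) (num_subjects : Int) (out : Int × Int × Int × Int) : Prop := out = find_hardest_and_easiest_subjects_alt scores num_subjects
instance (scores : List (List Int)) (num_subjects : Int) (out : Int × Int × Int × Int) : Decidable (Spec_find_hardest_and_easiest_subjects scores num_subjects out) := by unfold Spec_find_hardest_and_easiest_subjects; infer_instance

-- ===== CLAIM (what is proved, stated in full; the proofs are below) =====
def Claim_equal_find_hardest_and_easiest_subjects : Prop := ∀ (scores : List (List Int)) (num_subjects : Int), Dom_find_hardest_and_easiest_subjects scores num_subjects → Pre_find_hardest_and_easiest_subjects scores num_subjects → Spec_find_hardest_and_easiest_subjects scores num_subjects (find_hardest_and_easiest_subjects scores num_subjects)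

-- ===== LEMMAS AND PROOFS =====

-- canonical per-column counts (read with pyGetD, as both ports do)
def pvColP (scores : List (List Int)) (j : Int) : Int :=
  (scores.countP (fun row => decide (50 ≤ PySem.List.pyGetD row j 0)) : Int)
def pvColF (scores : List (List Int)) (j : Int) : Int :=
  (scores.countP (fun row => decide (PySem.List.pyGetD row j 0 < 50)) : Int)

-- canonical selection folds over an arbitrary index list
def pvSelF (scores : List (List Int)) (L : List Int) (b : Int × Int) : Int × Int :=
  L.foldl (fun b j => if pvColF scores j > b.2 then (j, pvColF scores j) else b) b
def pvSelP (scores : List (List Int)) (L : List Int) (b : Int × Int) : Int × Int :=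
  L.foldl (fun b j => if pvColP scores j > b.2 then (j, pvColP scores j) else b) b

theorem pvA_inner (scores : List (List Int)) (index : Int) (p f : Int) :
    scores.foldl (fun (pf : Int × Int) row =>
        if PySem.List.pyGetD row index 0 ≥ 50 then (pf.1 + 1, pf.2) else (pf.1, pf.2 + 1)) (p, f)
      = (p + pvColP scores index, f + pvColF scores index) := by
  induction scores generalizing p f with
  | nil => simp [pvColP, pvColF]
  | cons row rest ih =>
    simp only [List.foldl_cons]
    by_cases h : 50 ≤ PySem.List.pyGetD row index 0 <;>
      simp [h, not_le.mp, ih, pvColP, pvColF, not_lt] <;> ring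

theorem pvA_split (scores : List (List Int)) (L : List Int) (hs es hf ep : Int) :
    L.foldl
      (fun (st : Int × Int × Int × Int) index =>
        match st with
        | (hardest_subject, easiest_subject, hardest_subject_fails, easiest_subject_passes) =>
          let pf := (PySem.List.pyRange 0 (scores.length : Int) 1).foldl
            (fun (pf : Int × Int) count =>
              if PySem.List.pyGetD (PySem.List.pyGetD scores count []) index 0 ≥ 50
              then (pf.1 + 1, pf.2)
              else (pf.1, pf.2 + 1))
            (0, 0)
          let num_passes := pf.1
          let num_fails := pf.2
          let hfPair := if num_fails > hardest_subject_fails then (index, num_fails) else (hardest_subject, hardest_subject_fails)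
          let epPair := if num_passes > easiest_subject_passes then (index, num_passes) else (easiest_subject, easiest_subject_passes)
          (hfPair.1, epPair.1, hfPair.2, epPair.2))
      (hs, es, hf, ep)
      = ((pvSelF scores L (hs, hf)).1, (pvSelP scores L (es, ep)).1,
         (pvSelF scores L (hs, hf)).2, (pvSelP scores L (es, ep)).2) := by
  induction L generalizing hs es hf ep with
  | nil => simp [pvSelF, pvSelP]
  | cons j rest ih =>
    have hinner := PySem.List.foldl_pyRange_zero_pyGetD' scores ([] : List Int)
      (fun (pf : Int × Int) row =>
        if PySem.List.pyGetD row j 0 ≥ 50 then (pf.1 + 1, pf.2) else (pf.1, pf.2 + 1)) ((0 : Int), (0 : Int))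
    simp only [List.foldl_cons]
    rw [show ((PySem.List.pyRange 0 (scores.length : Int) 1).foldl
      (fun (pf : Int × Int) count =>
        if PySem.List.pyGetD (PySem.List.pyGetD scores count []) j 0 ≥ 50
        then (pf.1 + 1, pf.2) else (pf.1, pf.2 + 1)) (0, 0))
        = (pvColP scores j, pvColF scores j) from by
      rw [hinner, pvA_inner]; simp]
    simp only [pvSelF, pvSelP, List.foldl_cons]
    by_cases h1 : pvColF scores j > hf <;> by_cases h2 : pvColP scores j > ep <;>
      simp [h1, h2, ih] <;> simp [pvSelF, pvSelP]

theorem pvA_eq (scores : List (List Int)) (ns : Int) :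
    find_hardest_and_easiest_subjects scores ns
      = ((pvSelF scores (PySem.List.pyRange 0 ns 1) (0, 0)).1,
         (pvSelP scores (PySem.List.pyRange 0 ns 1) (0, 0)).1,
         (pvSelF scores (PySem.List.pyRange 0 ns 1) (0, 0)).2,
         (pvSelP scores (PySem.List.pyRange 0 ns 1) (0, 0)).2) := by
  unfold find_hardest_and_easiest_subjects
  exact pvA_split scores _ 0 0 0 0

theorem pvGetD_setD (xs : List Int) (i j v : Int) (h0 : 0 ≤ i) (hj : 0 ≤ j) (hi : i < (xs.length : Int)) :
    PySem.List.pyGetD (PySem.List.pySetD xs i v) j 0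
      = if j = i then v else PySem.List.pyGetD xs j 0 := by
  obtain ⟨k, rfl⟩ : ∃ k : Nat, i = (k : Int) := ⟨i.toNat, by omega⟩
  obtain ⟨l, rfl⟩ : ∃ l : Nat, j = (l : Int) := ⟨j.toNat, by omega⟩
  rw [PySem.List.pyGetD_pySetD_natCast xs k l v 0 (by omega)]
  by_cases h : l = k
  · rw [if_pos h, if_pos (by exact_mod_cast h)]
  · rw [if_neg h, if_neg (by exact_mod_cast h)]

theorem pvAccumRow_aux (row : List Int) (n : Int) (m : Nat) :
    ∀ (a : Int) (ps fs : List Int) (r : List Int × List Int), (n - a).toNat = m → 0 ≤ a →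
      ps.length = n.toNat → fs.length = n.toNat →
      r = (PySem.List.pyRange a n 1).foldl
        (fun (acc : List Int × List Int) j =>
          if PySem.List.pyGetD row j 0 ≥ 50
          then (PySem.List.pySetD acc.1 j (PySem.List.pyGetD acc.1 j 0 + 1), acc.2)
          else (acc.1, PySem.List.pySetD acc.2 j (PySem.List.pyGetD acc.2 j 0 + 1)))
        (ps, fs) →
      r.1.length = n.toNat ∧ r.2.length = n.toNat ∧
      ∀ j : Int, 0 ≤ j → j < n →
        PySem.List.pyGetD r.1 j 0
          = PySem.List.pyGetD ps j 0 + (if a ≤ j ∧ 50 ≤ PySem.List.pyGetD row j 0 then 1 else 0) ∧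
        PySem.List.pyGetD r.2 j 0
          = PySem.List.pyGetD fs j 0 + (if a ≤ j ∧ ¬ 50 ≤ PySem.List.pyGetD row j 0 then 1 else 0) := by
  induction m with
  | zero =>
    intro a ps fs r hm h0 hps hfs hr
    rw [PySem.List.pyRange_one_eq_nil (by omega), List.foldl_nil] at hr
    subst hr
    refine ⟨hps, hfs, fun j hj0 hjn => ?_⟩
    dsimp only
    constructor <;> split_ifs <;> omega
  | succ m ih =>
    intro a ps fs r hm h0 hps hfs hr
    have han : a < n := by omega
    rw [PySem.List.pyRange_one_cons han, List.foldl_cons] at hr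
    simp only [ge_iff_le] at hr
    by_cases hrow : 50 ≤ PySem.List.pyGetD row a 0
    · rw [if_pos hrow] at hr
      have hps' : (PySem.List.pySetD ps a (PySem.List.pyGetD ps a 0 + 1)).length = n.toNat := by
        rw [PySem.List.length_pySetD]; exact hps
      obtain ⟨L1, L2, H⟩ := ih (a + 1) _ fs r (by omega) (by omega) hps' hfs hr
      refine ⟨L1, L2, fun j hj0 hjn => ?_⟩
      obtain ⟨E1, E2⟩ := H j hj0 hjn
      rw [E1, E2, pvGetD_setD ps a j _ h0 hj0 (by omega)]
      by_cases hja : j = a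
      · subst hja
        constructor <;> split_ifs <;> omega
      · rw [if_neg hja]
        constructor <;> split_ifs <;> omega
    · rw [if_neg hrow] at hr
      have hfs' : (PySem.List.pySetD fs a (PySem.List.pyGetD fs a 0 + 1)).length = n.toNat := by
        rw [PySem.List.length_pySetD]; exact hfs
      obtain ⟨L1, L2, H⟩ := ih (a + 1) ps _ r (by omega) (by omega) hps hfs' hr
      refine ⟨L1, L2, fun j hj0 hjn => ?_⟩
      obtain ⟨E1, E2⟩ := H j hj0 hjn
      rw [E1, E2, pvGetD_setD fs a j _ h0 hj0 (by omega)]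
      by_cases hja : j = a
      · subst hja
        constructor <;> split_ifs <;> omega
      · rw [if_neg hja]
        constructor <;> split_ifs <;> omega

theorem pvAccumRow_spec (row : List Int) (n : Int) (ps fs : List Int)
    (hps : ps.length = n.toNat) (hfs : fs.length = n.toNat) :
    (pvAccumRow row n ps fs).1.length = n.toNat ∧ (pvAccumRow row n ps fs).2.length = n.toNat ∧
    ∀ j : Int, 0 ≤ j → j < n →
      PySem.List.pyGetD (pvAccumRow row n ps fs).1 j 0
        = PySem.List.pyGetD ps j 0 + (if 50 ≤ PySem.List.pyGetD row j 0 then 1 else 0) ∧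
      PySem.List.pyGetD (pvAccumRow row n ps fs).2 j 0
        = PySem.List.pyGetD fs j 0 + (if 50 ≤ PySem.List.pyGetD row j 0 then 0 else 1) := by
  obtain ⟨L1, L2, H⟩ := pvAccumRow_aux row n (n - 0).toNat 0 ps fs (pvAccumRow row n ps fs)
    rfl le_rfl hps hfs rfl
  refine ⟨L1, L2, fun j hj0 hjn => ?_⟩
  obtain ⟨E1, E2⟩ := H j hj0 hjn
  rw [E1, E2]
  constructor <;> split_ifs <;> omega

theorem pvAcc_entries (scores : List (List Int)) (n : Int) (ps fs : List Int)
    (hps : ps.length = n.toNat) (hfs : fs.length = n.toNat) :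
    (scores.foldl (fun (pf : List Int × List Int) row => pvAccumRow row n pf.1 pf.2) (ps, fs)).1.length = n.toNat ∧
    (scores.foldl (fun (pf : List Int × List Int) row => pvAccumRow row n pf.1 pf.2) (ps, fs)).2.length = n.toNat ∧
    ∀ j : Int, 0 ≤ j → j < n →
      PySem.List.pyGetD (scores.foldl (fun (pf : List Int × List Int) row => pvAccumRow row n pf.1 pf.2) (ps, fs)).1 j 0
        = PySem.List.pyGetD ps j 0 + pvColP scores j ∧
      PySem.List.pyGetD (scores.foldl (fun (pf : List Int × List Int) row => pvAccumRow row n pf.1 pf.2) (ps, fs)).2 j 0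
        = PySem.List.pyGetD fs j 0 + pvColF scores j := by
  induction scores generalizing ps fs with
  | nil => simpa [pvColP, pvColF] using ⟨hps, hfs⟩
  | cons row rest ih =>
    obtain ⟨h1, h2, h3⟩ := pvAccumRow_spec row n ps fs hps hfs
    simp only [List.foldl_cons]
    obtain ⟨g1, g2, g3⟩ := ih (pvAccumRow row n ps fs).1 (pvAccumRow row n ps fs).2 h1 h2
    refine ⟨g1, g2, fun j hj0 hjn => ?_⟩
    obtain ⟨e1, e2⟩ := (g3 j hj0 hjn)
    obtain ⟨f1, f2⟩ := h3 j hj0 hjn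
    constructor
    · rw [e1, f1]
      by_cases h : 50 ≤ PySem.List.pyGetD row j 0 <;>
        simp [h, not_le.mp, pvColP, not_lt] <;> ring
    · rw [e2, f2]
      by_cases h : 50 ≤ PySem.List.pyGetD row j 0 <;>
        simp [h, not_le.mp, pvColF, not_lt] <;> ring

theorem pvSelect_eq_selF (scores : List (List Int)) (counts : List Int) (n : Int)
    (h : ∀ j : Int, 0 ≤ j → j < n → PySem.List.pyGetD counts j 0 = pvColF scores j) :
    pvSelect counts n = pvSelF scores (PySem.List.pyRange 0 n 1) (0, 0) := by
  unfold pvSelect pvSelF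
  apply PySem.List.foldl_congr_mem
  intro b j hj
  rw [PySem.List.mem_pyRange_one] at hj
  rw [h j hj.1 hj.2]

theorem pvSelect_eq_selP (scores : List (List Int)) (counts : List Int) (n : Int)
    (h : ∀ j : Int, 0 ≤ j → j < n → PySem.List.pyGetD counts j 0 = pvColP scores j) :
    pvSelect counts n = pvSelP scores (PySem.List.pyRange 0 n 1) (0, 0) := by
  unfold pvSelect pvSelP
  apply PySem.List.foldl_congr_mem
  intro b j hj
  rw [PySem.List.mem_pyRange_one] at hj
  rw [h j hj.1 hj.2]

-- ===== VERDICT (by name: the statement is the Claim_ definition above) =====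
theorem find_hardest_and_easiest_subjects_spec : Claim_equal_find_hardest_and_easiest_subjects := by
  intro scores ns _ _
  unfold Spec_find_hardest_and_easiest_subjects
  rw [pvA_eq]
  unfold find_hardest_and_easiest_subjects_alt
  have hrep : (List.replicate (max ns 0).toNat (0 : Int)).length = (max ns 0).toNat := by simp
  obtain ⟨h1, h2, h3⟩ := pvAcc_entries scores (max ns 0) _ _ hrep hrep
  have hrange : PySem.List.pyRange 0 ns 1 = PySem.List.pyRange 0 (max ns 0) 1 := by
    by_cases h : 0 ≤ ns
    · rw [max_eq_left h]
    · rw [PySem.List.pyRange_one_eq_nil (by omega), max_eq_right (by omega),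
        PySem.List.pyRange_one_eq_nil le_rfl]
  have hget : ∀ j : Int, 0 ≤ j → j < max ns 0 →
      PySem.List.pyGetD (List.replicate (max ns 0).toNat (0 : Int)) j 0 = 0 := by
    intro j h0 hn
    obtain ⟨k, rfl⟩ : ∃ k : Nat, j = (k : Int) := ⟨j.toNat, (Int.toNat_of_nonneg h0).symm⟩
    simp [List.getD]
  simp only []
  rw [pvSelect_eq_selF scores _ (max ns 0) (fun j h0 hn => by rw [(h3 j h0 hn).2, hget j h0 hn]; ring),
      pvSelect_eq_selP scores _ (max ns 0) (fun j h0 hn => by rw [(h3 j h0 hn).1, hget j h0 hn]; ring),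
      hrange]
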